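-- pv_equiv track=rewrite | github.com/jdanray/leetcode | differenceOfDistinctValues.py | differenceOfDistinctValues
-- ===== SOURCE A (Python) =====
-- def differenceOfDistinctValues(grid):
-- 	M = len(grid)
-- 	N = len(grid[0])
--
-- 	res = [[0 for _ in range(N)] for _ in range(M)]
-- 	for i in range(M):
-- 		for j in range(N):
-- 			left = set()
-- 			k = i - 1
-- 			l = j - 1
-- 			while k >= 0 and l >= 0:
-- 				left.add(grid[k][l])
-- 				k -= 1
-- 				l -= 1
--
-- 			right = set()
-- 			k = i + 1
-- 			l = j + 1
-- 			while k < M and l < N: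
-- 				right.add(grid[k][l])
-- 				k += 1
-- 				l += 1
--
-- 			res[i][j] = abs(len(left) - len(right))
--
-- 	return res
-- ===== SOURCE B (Python) =====
-- def _counts(vals):
-- 	# running distinct-count: out[t] = number of distinct values among vals[:t]
-- 	seen = set()
-- 	out = []
-- 	for v in vals:
-- 		out.append(len(seen))
-- 		seen.add(v)
-- 	return out
--
-- def differenceOfDistinctValues(grid):
-- 	M = len(grid)
-- 	N = len(grid[0])
-- 	res = [[0 for _ in range(N)] for _ in range(M)]
-- 	for d in range(-(N - 1), M):
-- 		i0 = max(d, 0)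
-- 		j0 = i0 - d
-- 		L = min(M - i0, N - j0)
-- 		vals = [grid[i0 + t][j0 + t] for t in range(L)]
-- 		pre = _counts(vals)
-- 		suf = list(reversed(_counts(list(reversed(vals)))))
-- 		for t in range(L):
-- 			res[i0 + t][j0 + t] = abs(pre[t] - suf[t])
-- 	return res
-- ===== Notes on version B (the rewrite author's own statement) =====
-- stated objective: faster
-- what changed: Instead of rebuilding the upper-left and lower-right diagonal distinct-sets from scratch for every cell, B walks each diagonal once, recording running distinct-set sizes in a prefix pass and a reversed-prefix (suffix) pass, then fills all cells of that diagonal.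
-- outside the precondition, e.g. on differenceOfDistinctValues([[5], []]): A returns [[0], [0]], B raises IndexError
import Mathlib
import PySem

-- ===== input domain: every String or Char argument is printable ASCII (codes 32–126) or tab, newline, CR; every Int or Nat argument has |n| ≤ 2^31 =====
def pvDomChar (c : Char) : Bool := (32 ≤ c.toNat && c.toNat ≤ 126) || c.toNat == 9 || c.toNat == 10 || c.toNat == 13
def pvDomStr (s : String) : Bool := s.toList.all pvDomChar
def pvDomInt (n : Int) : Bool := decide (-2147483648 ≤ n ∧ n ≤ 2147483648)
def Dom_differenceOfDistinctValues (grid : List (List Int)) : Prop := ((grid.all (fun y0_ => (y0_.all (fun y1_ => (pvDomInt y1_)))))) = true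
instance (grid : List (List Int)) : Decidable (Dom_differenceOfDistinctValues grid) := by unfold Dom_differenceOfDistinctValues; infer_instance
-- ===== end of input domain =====

-- B replaces A's per-cell diagonal walks by one pass per diagonal keeping running distinct-set
-- prefix/suffix counts (objective: faster, O(M*N) instead of O(M*N*(M+N))).

-- ===== PORT A =====
-- grid[k][l] on in-range indices (Pre_ keeps every performed access in range, where this is exact)
def pvIdx (grid : List (List Int)) (k l : Int) : Int :=
  (PySem.List.pyGet? ((PySem.List.pyGet? grid k).getD []) l).getD 0

-- res[i][j] = v  (every write of either program is in range: i < M, j < N)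
def pvSet2 (res : List (List Int)) (i j : Nat) (v : Int) : List (List Int) :=
  res.set i ((res.getD i []).set j v)

-- A's first while loop: walk up-left collecting values into the set
def pvUp (grid : List (List Int)) (k l : Int) (s : PySem.Set Int) : PySem.Set Int :=
  if 0 ≤ k ∧ 0 ≤ l then pvUp grid (k - 1) (l - 1) (PySem.Set.add s (pvIdx grid k l)) else s
termination_by (k + 1).toNat
decreasing_by omega

-- A's second while loop: walk down-right collecting values into the set
def pvDown (grid : List (List Int)) (M N k l : Int) (s : PySem.Set Int) : PySem.Set Int :=
  if k < M ∧ l < N then pvDown grid M N (k + 1) (l + 1) (PySem.Set.add s (pvIdx grid k l)) else s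
termination_by (M - k).toNat
decreasing_by omega

-- body of A's doubly-nested loop: abs(len(left) - len(right))
def pvCellA (grid : List (List Int)) (M N i j : Nat) : Int :=
  let left := pvUp grid ((i : Int) - 1) ((j : Int) - 1) PySem.Set.empty
  let right := pvDown grid (M : Int) (N : Int) ((i : Int) + 1) ((j : Int) + 1) PySem.Set.empty
  (((left.length : Int) - (right.length : Int)).natAbs : Int)

def differenceOfDistinctValues (grid : List (List Int)) : List (List Int) :=
  let M := grid.length
  let N := (grid.headD []).length
  let res0 := (List.range M).map (fun _ => (List.range N).map (fun _ => (0 : Int)))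
  (List.range M).foldl (fun res i =>
    (List.range N).foldl (fun res j =>
      pvSet2 res i j (pvCellA grid M N i j)) res) res0

-- ===== PORT B =====
-- _counts(vals): out[t] = len(seen) before adding vals[t]
def pvCounts (vals : List Int) : List Int :=
  (vals.foldl (fun (st : PySem.Set Int × List Int) v =>
    (PySem.Set.add st.1 v, st.2 ++ [(st.1.length : Int)])) (PySem.Set.empty, [])).2

def differenceOfDistinctValues_alt (grid : List (List Int)) : List (List Int) :=
  let M := grid.length
  let N := (grid.headD []).length
  let res0 := (List.range M).map (fun _ => (List.range N).map (fun _ => (0 : Int)))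
  (PySem.List.pyRange (-(N : Int) + 1) (M : Int) 1).foldl (fun res d =>
    let i0 : Int := max d 0
    let j0 : Int := i0 - d
    let L : Int := min ((M : Int) - i0) ((N : Int) - j0)
    let vals := (List.range L.toNat).map (fun (t : Nat) => pvIdx grid (i0 + (t : Int)) (j0 + (t : Int)))
    let pre := pvCounts vals
    let suf := (pvCounts vals.reverse).reverse
    (List.range L.toNat).foldl (fun res (t : Nat) =>
      pvSet2 res (i0 + (t : Int)).toNat (j0 + (t : Int)).toNat
        (((pre.getD t 0 - suf.getD t 0).natAbs : Int))) res) res0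

-- ===== PRECONDITION & SPEC =====
-- Pre_ excludes the empty grid (A raises IndexError on grid[0]) and grids having a row shorter
-- than the first row, where a diagonal walk can index past a row's end (IndexError in B, and in A
-- too except when no diagonal of length ≥ 2 reaches the missing cells).
def Pre_differenceOfDistinctValues (grid : List (List Int)) : Prop :=
  grid ≠ [] ∧ ∀ row ∈ grid, (grid.headD []).length ≤ row.length
instance (grid : List (List Int)) : Decidable (Pre_differenceOfDistinctValues grid) := by
  unfold Pre_differenceOfDistinctValues; infer_instance
def pvWitness_differenceOfDistinctValues : List (List Int) := [[1, 2], [3, 1]]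

def Spec_differenceOfDistinctValues (grid : List (List Int)) (out : List (List Int)) : Prop := out = differenceOfDistinctValues_alt grid
instance (grid : List (List Int)) (out : List (List Int)) : Decidable (Spec_differenceOfDistinctValues grid out) := by unfold Spec_differenceOfDistinctValues; infer_instance

-- ===== CLAIM (what is proved, stated in full; the proofs are below) =====
def Claim_equal_differenceOfDistinctValues : Prop := ∀ (grid : List (List Int)), Dom_differenceOfDistinctValues grid → Pre_differenceOfDistinctValues grid → Spec_differenceOfDistinctValues grid (differenceOfDistinctValues grid)

-- ===== LEMMAS AND PROOFS =====

-- proof-side abbreviations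
def pvDcount (l : List Int) : Nat := (PySem.Set.ofList l).length
def pvI0 (d : Int) : Int := max d 0
def pvJ0 (d : Int) : Int := pvI0 d - d
def pvL (M N : Nat) (d : Int) : Int := min ((M : Int) - pvI0 d) ((N : Int) - pvJ0 d)
def pvVals (grid : List (List Int)) (M N : Nat) (d : Int) : List Int :=
  (List.range (pvL M N d).toNat).map (fun (t : Nat) => pvIdx grid (pvI0 d + (t : Int)) (pvJ0 d + (t : Int)))
def pvVB (grid : List (List Int)) (M N : Nat) (d : Int) (t : Nat) : Int :=
  (((pvCounts (pvVals grid M N d)).getD t 0 -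
    ((pvCounts (pvVals grid M N d).reverse).reverse).getD t 0).natAbs : Int)
def pvDiagOps (grid : List (List Int)) (M N : Nat) (d : Int) : List (Nat × Nat × Int) :=
  (List.range (pvL M N d).toNat).map (fun (t : Nat) => ((pvI0 d + (t : Int)).toNat, (pvJ0 d + (t : Int)).toNat, pvVB grid M N d t))
def pvOpsA (grid : List (List Int)) (M N : Nat) : List (Nat × Nat × Int) :=
  (List.range M).flatMap (fun i => (List.range N).map (fun j => (i, j, pvCellA grid M N i j)))
def pvWrites (ops : List (Nat × Nat × Int)) (res : List (List Int)) : List (List Int) :=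
  ops.foldl (fun r op => pvSet2 r op.1 op.2.1 op.2.2) res
def pvG2 (res : List (List Int)) (i j : Nat) : Int := (res.getD i []).getD j 0
def pvRes0 (M N : Nat) : List (List Int) :=
  (List.range M).map (fun _ => (List.range N).map (fun _ => (0 : Int)))
-- A's up-walk as a list, and the down-walk as a list
def pvUpList (grid : List (List Int)) (k l : Int) : List Int :=
  if 0 ≤ k ∧ 0 ≤ l then pvIdx grid k l :: pvUpList grid (k - 1) (l - 1) else []
termination_by (k + 1).toNat
decreasing_by omega
def pvDownList (grid : List (List Int)) (M N k l : Int) : List Int :=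
  if k < M ∧ l < N then pvIdx grid k l :: pvDownList grid M N (k + 1) (l + 1) else []
termination_by (M - k).toNat
decreasing_by omega


-- A. pvSet2 basics
theorem length_pvSet2 (res : List (List Int)) (i j : Nat) (v : Int) :
    (pvSet2 res i j v).length = res.length := by
  simp [pvSet2]

theorem rowlen_pvSet2 (res : List (List Int)) (i j : Nat) (v : Int) (i' : Nat) :
    ((pvSet2 res i j v).getD i' []).length = (res.getD i' []).length := by
  simp only [pvSet2, List.getD_eq_getElem?_getD]
  by_cases hii : i = i'
  · subst hii
    by_cases hi : i < res.length
    · rw [List.getElem?_set_self hi]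
      simp only [Option.getD_some, List.length_set]
    · rw [List.set_eq_of_length_le (by omega)]
  · rw [List.getElem?_set_ne hii]

theorem pvG2_pvSet2_same (res : List (List Int)) (i j : Nat) (v : Int)
    (hi : i < res.length) (hj : j < (res.getD i []).length) :
    pvG2 (pvSet2 res i j v) i j = v := by
  have hj' : j < (res[i]?.getD []).length := by rw [← List.getD_eq_getElem?_getD]; exact hj
  simp only [pvG2, pvSet2, List.getD_eq_getElem?_getD]
  rw [List.getElem?_set_self hi, Option.getD_some, List.getElem?_set_self hj', Option.getD_some]

theorem pvG2_pvSet2_other (res : List (List Int)) (i j i' j' : Nat) (v : Int)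
    (h : ¬(i = i' ∧ j = j')) :
    pvG2 (pvSet2 res i j v) i' j' = pvG2 res i' j' := by
  simp only [pvG2, pvSet2, List.getD_eq_getElem?_getD]
  by_cases hii : i = i'
  · subst hii
    have hjj : j ≠ j' := fun hx => h ⟨rfl, hx⟩
    by_cases hi : i < res.length
    · rw [List.getElem?_set_self hi, Option.getD_some, List.getElem?_set_ne hjj]
    · rw [List.set_eq_of_length_le (by omega)]
  · rw [List.getElem?_set_ne hii]

-- B. pvWrites basics
theorem pvWrites_cons (op : Nat × Nat × Int) (rest : List (Nat × Nat × Int)) (res : List (List Int)) :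
    pvWrites (op :: rest) res = pvWrites rest (pvSet2 res op.1 op.2.1 op.2.2) := rfl

theorem length_pvWrites (ops : List (Nat × Nat × Int)) (res : List (List Int)) :
    (pvWrites ops res).length = res.length := by
  induction ops generalizing res with
  | nil => rfl
  | cons op rest ih => rw [pvWrites_cons, ih, length_pvSet2]

theorem rowlen_pvWrites (ops : List (Nat × Nat × Int)) (res : List (List Int)) (i' : Nat) :
    ((pvWrites ops res).getD i' []).length = (res.getD i' []).length := by
  induction ops generalizing res with
  | nil => rfl
  | cons op rest ih => rw [pvWrites_cons, ih, rowlen_pvSet2]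

theorem pvG2_pvWrites_notmem (ops : List (Nat × Nat × Int)) (res : List (List Int)) (i j : Nat)
    (h : ∀ op ∈ ops, ¬(op.1 = i ∧ op.2.1 = j)) :
    pvG2 (pvWrites ops res) i j = pvG2 res i j := by
  induction ops generalizing res with
  | nil => rfl
  | cons op rest ih =>
    rw [pvWrites_cons, ih _ (fun o ho => h o (List.mem_cons_of_mem _ ho)),
      pvG2_pvSet2_other _ _ _ _ _ _ (h op List.mem_cons_self)]

theorem pvG2_pvWrites_mem (ops : List (Nat × Nat × Int)) (res : List (List Int)) (i j : Nat) (v : Int)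
    (hmem : (i, j, v) ∈ ops)
    (huniq : ∀ op ∈ ops, op.1 = i → op.2.1 = j → op.2.2 = v)
    (hi : i < res.length) (hj : j < (res.getD i []).length) :
    pvG2 (pvWrites ops res) i j = v := by
  induction ops generalizing res with
  | nil => simp at hmem
  | cons op rest ih =>
    rw [pvWrites_cons]
    by_cases hrest : ∃ v', (i, j, v') ∈ rest
    · obtain ⟨v', hv'⟩ := hrest
      have hvv : v' = v := huniq (i, j, v') (List.mem_cons_of_mem _ hv') rfl rfl
      subst hvv
      exact ih (pvSet2 res op.1 op.2.1 op.2.2) hv'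
        (fun o ho => huniq o (List.mem_cons_of_mem _ ho))
        (by rw [length_pvSet2]; exact hi) (by rw [rowlen_pvSet2]; exact hj)
    · have hop : op = (i, j, v) := by
        rcases List.mem_cons.mp hmem with h | h
        · exact h.symm
        · exact absurd ⟨v, h⟩ hrest
      have hno : ∀ o ∈ rest, ¬(o.1 = i ∧ o.2.1 = j) := by
        intro o ho ⟨h1, h2⟩
        exact hrest ⟨o.2.2, by rw [← h1, ← h2]; exact ho⟩
      rw [pvG2_pvWrites_notmem rest _ i j hno, hop, pvG2_pvSet2_same _ _ _ _ hi hj]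

-- C. pvCounts: running distinct-prefix counts
theorem pvCounts_go (l : List Int) : ∀ (s : PySem.Set Int) (out : List Int),
    (l.foldl (fun (st : PySem.Set Int × List Int) v =>
        (PySem.Set.add st.1 v, st.2 ++ [(st.1.length : Int)])) (s, out)).2
      = out ++ (List.range l.length).map
          (fun t => ((PySem.Set.update s (l.take t)).length : Int)) := by
  induction l with
  | nil => simp
  | cons v l ih =>
    intro s out
    simp only [List.foldl_cons, ih, List.length_cons, List.range_succ_eq_map, List.map_cons,
      List.map_map]
    simp [PySem.Set.update_nil, PySem.Set.update_cons, Function.comp_def]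

theorem pvCounts_spec (l : List Int) :
    pvCounts l = (List.range l.length).map (fun t => (pvDcount (l.take t) : Int)) := by
  unfold pvCounts
  rw [pvCounts_go]
  simp [pvDcount, PySem.Set.update_nil_left, PySem.Set.empty]

theorem length_pvCounts (l : List Int) : (pvCounts l).length = l.length := by
  rw [pvCounts_spec]; simp

theorem pvDcount_perm (l1 l2 : List Int) (h : l1.Perm l2) : pvDcount l1 = pvDcount l2 := by
  have h1 : (PySem.Set.ofList l1).Perm (PySem.Set.ofList l2) := by
    rw [List.perm_ext_iff_of_nodup (PySem.Set.nodup_ofList _) (PySem.Set.nodup_ofList _)]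
    intro a
    simp only [PySem.Set.mem_ofList]
    exact h.mem_iff
  exact h1.length_eq

-- D. A's while loops compute the distinct values of the diagonal walks
theorem pvUp_eq (grid : List (List Int)) (k l : Int) (s : PySem.Set Int) :
    pvUp grid k l s = PySem.Set.update s (pvUpList grid k l) := by
  fun_induction pvUp grid k l s with
  | case1 k l s h ih =>
    rw [pvUpList, if_pos h, ih, PySem.Set.update_cons]
  | case2 k l s h =>
    rw [pvUpList, if_neg h, PySem.Set.update_nil]

theorem pvDown_eq (grid : List (List Int)) (M N k l : Int) (s : PySem.Set Int) :
    pvDown grid M N k l s = PySem.Set.update s (pvDownList grid M N k l) := by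
  fun_induction pvDown grid M N k l s with
  | case1 k l s h ih =>
    rw [pvDownList, if_pos h, ih, PySem.Set.update_cons]
  | case2 k l s h =>
    rw [pvDownList, if_neg h, PySem.Set.update_nil]

-- E. diagonal geometry: both programs' cell values are distinct counts of diagonal prefix/suffix
theorem length_pvVals (grid : List (List Int)) (M N : Nat) (d : Int) :
    (pvVals grid M N d).length = (pvL M N d).toNat := by
  simp [pvVals]

theorem getElem_pvVals (grid : List (List Int)) (M N : Nat) (d : Int) (t : Nat)
    (ht : t < (pvL M N d).toNat) :
    (pvVals grid M N d)[t]'(by rw [length_pvVals]; exact ht) =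
      pvIdx grid (pvI0 d + t) (pvJ0 d + t) := by
  simp only [pvVals, List.getElem_map, List.getElem_range]

theorem pvUpList_take (grid : List (List Int)) (M N : Nat) (d : Int) :
    ∀ t : Nat, t ≤ (pvL M N d).toNat →
      pvUpList grid (pvI0 d + t - 1) (pvJ0 d + t - 1) = ((pvVals grid M N d).take t).reverse := by
  intro t
  induction t with
  | zero =>
    intro _
    rw [pvUpList, if_neg (by simp only [pvI0, pvJ0]; omega)]
    simp
  | succ t ih =>
    intro h
    have ht : t < (pvL M N d).toNat := by omega
    rw [pvUpList, if_pos (by simp only [pvI0, pvJ0]; omega)]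
    have e1 : pvI0 d + (t + 1 : Nat) - 1 = pvI0 d + t := by push_cast; ring
    have e2 : pvJ0 d + (t + 1 : Nat) - 1 = pvJ0 d + t := by push_cast; ring
    rw [e1, e2]
    have e3 : pvI0 d + (t : Int) - 1 = pvI0 d + t - 1 := rfl
    rw [ih (by omega)]
    rw [List.take_succ_eq_append_getElem (by rw [length_pvVals]; exact ht)]
    rw [List.reverse_append]
    simp [getElem_pvVals grid M N d t ht]

theorem pvDownList_drop (grid : List (List Int)) (M N : Nat) (d : Int) :
    ∀ c s : Nat, (pvL M N d).toNat - s = c →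
      pvDownList grid (M : Int) (N : Int) (pvI0 d + s) (pvJ0 d + s) = (pvVals grid M N d).drop s := by
  intro c
  induction c with
  | zero =>
    intro s hs
    rw [pvDownList, if_neg (by simp only [pvI0, pvJ0, pvL] at hs ⊢; omega)]
    rw [List.drop_eq_nil_of_le (by rw [length_pvVals]; omega)]
  | succ c ih =>
    intro s hs
    have hsL : s < (pvL M N d).toNat := by omega
    rw [pvDownList, if_pos (by simp only [pvI0, pvJ0, pvL] at hsL ⊢; omega)]
    have e1 : pvI0 d + (s : Int) + 1 = pvI0 d + ((s + 1 : Nat) : Int) := by push_cast; ring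
    have e2 : pvJ0 d + (s : Int) + 1 = pvJ0 d + ((s + 1 : Nat) : Int) := by push_cast; ring
    rw [e1, e2, ih (s + 1) (by omega), ← getElem_pvVals grid M N d s hsL]
    exact (List.drop_eq_getElem_cons (by rw [length_pvVals]; exact hsL)).symm

theorem pvGetD_reverse (l : List Int) (t : Nat) (h : t < l.length) :
    l.reverse.getD t 0 = l.getD (l.length - 1 - t) 0 := by
  rw [List.getD_eq_getElem _ _ (by simpa using h), List.getD_eq_getElem _ _ (by omega),
    List.getElem_reverse]

theorem pvCell_eq (grid : List (List Int)) (M N i j : Nat) (hi : i < M) (hj : j < N) :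
    pvVB grid M N ((i : Int) - j) (min i j) = pvCellA grid M N i j := by
  set d : Int := (i : Int) - j with hd
  set t0 : Nat := min i j with ht0
  have hI : pvI0 d + (t0 : Int) = i := by simp only [pvI0]; omega
  have hJ : pvJ0 d + (t0 : Int) = j := by simp only [pvI0, pvJ0]; omega
  have hL : (t0 : Int) < pvL M N d := by simp only [pvL, pvI0, pvJ0]; omega
  have hLn : t0 < (pvL M N d).toNat := by omega
  have hlen : (pvVals grid M N d).length = (pvL M N d).toNat := length_pvVals grid M N d
  -- A's side
  have hup : pvUp grid ((i : Int) - 1) ((j : Int) - 1) PySem.Set.empty =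
      PySem.Set.ofList (((pvVals grid M N d).take t0).reverse) := by
    rw [pvUp_eq]
    have : (i : Int) - 1 = pvI0 d + t0 - 1 := by omega
    rw [this, show (j : Int) - 1 = pvJ0 d + t0 - 1 by omega]
    rw [pvUpList_take grid M N d t0 (by omega)]
    rfl
  have hdown : pvDown grid (M : Int) (N : Int) ((i : Int) + 1) ((j : Int) + 1) PySem.Set.empty =
      PySem.Set.ofList ((pvVals grid M N d).drop (t0 + 1)) := by
    rw [pvDown_eq]
    rw [show (i : Int) + 1 = pvI0 d + ((t0 + 1 : Nat) : Int) by push_cast; omega,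
        show (j : Int) + 1 = pvJ0 d + ((t0 + 1 : Nat) : Int) by push_cast; omega]
    rw [pvDownList_drop grid M N d ((pvL M N d).toNat - (t0 + 1)) (t0 + 1) rfl]
    rfl
  have hA : pvCellA grid M N i j =
      (((pvDcount ((pvVals grid M N d).take t0) : Int) -
        (pvDcount ((pvVals grid M N d).drop (t0 + 1)) : Int)).natAbs : Int) := by
    unfold pvCellA
    rw [hup, hdown]
    have := pvDcount_perm (((pvVals grid M N d).take t0).reverse) ((pvVals grid M N d).take t0)
      (List.reverse_perm _)
    unfold pvDcount at this
    simp only [this, pvDcount]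
  -- B's side
  have hpre : (pvCounts (pvVals grid M N d)).getD t0 0 =
      (pvDcount ((pvVals grid M N d).take t0) : Int) := by
    rw [pvCounts_spec, hlen, PySem.List.getD_map_range _ _ _ _ hLn]
  have hsufl : (pvCounts (pvVals grid M N d).reverse).length = (pvL M N d).toNat := by
    rw [length_pvCounts, List.length_reverse, hlen]
  have hsuf : ((pvCounts (pvVals grid M N d).reverse).reverse).getD t0 0 =
      (pvDcount ((pvVals grid M N d).drop (t0 + 1)) : Int) := by
    rw [pvGetD_reverse _ _ (by rw [hsufl]; omega), hsufl, pvCounts_spec,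
      List.length_reverse, hlen, PySem.List.getD_map_range _ _ _ _ (by omega)]
    have htk : ((pvVals grid M N d).reverse).take ((pvL M N d).toNat - 1 - t0) =
        ((pvVals grid M N d).drop (t0 + 1)).reverse := by
      rw [List.take_reverse, hlen,
        show (pvL M N d).toNat - ((pvL M N d).toNat - 1 - t0) = t0 + 1 from by omega]
    rw [htk, pvDcount_perm _ _ (List.reverse_perm _)]
  unfold pvVB
  rw [hpre, hsuf, hA]

-- F. the two ports as write sequences over the zero matrix
theorem length_pvRes0 (M N : Nat) : (pvRes0 M N).length = M := by simp [pvRes0]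

theorem rowlen_pvRes0 (M N i : Nat) (hi : i < M) : ((pvRes0 M N).getD i []).length = N := by
  rw [pvRes0, List.getD_eq_getElem?_getD, List.getElem?_map, List.getElem?_range hi]
  simp

theorem portA_eq (grid : List (List Int)) :
    differenceOfDistinctValues grid =
      pvWrites (pvOpsA grid grid.length ((grid.headD []).length))
        (pvRes0 grid.length ((grid.headD []).length)) := by
  unfold differenceOfDistinctValues pvOpsA pvWrites pvRes0
  rw [List.foldl_flatMap]
  simp only [List.foldl_map]

theorem portB_eq (grid : List (List Int)) :
    differenceOfDistinctValues_alt grid =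
      pvWrites ((PySem.List.pyRange (-(((grid.headD []).length : Nat) : Int) + 1) (grid.length : Int) 1).flatMap
          (pvDiagOps grid grid.length ((grid.headD []).length)))
        (pvRes0 grid.length ((grid.headD []).length)) := by
  unfold differenceOfDistinctValues_alt pvDiagOps pvWrites pvRes0 pvVB pvVals pvL pvI0 pvJ0
  rw [List.foldl_flatMap]
  simp only [List.foldl_map, pvI0]

-- G. every admissible cell is written with the same value by both programs
theorem opsA_mem (grid : List (List Int)) (M N i j : Nat) (hi : i < M) (hj : j < N) :
    (i, j, pvCellA grid M N i j) ∈ pvOpsA grid M N := by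
  simp only [pvOpsA, List.mem_flatMap, List.mem_map, List.mem_range]
  exact ⟨i, hi, j, hj, rfl⟩

theorem opsA_uniq (grid : List (List Int)) (M N i j : Nat) :
    ∀ op ∈ pvOpsA grid M N, op.1 = i → op.2.1 = j → op.2.2 = pvCellA grid M N i j := by
  intro op hop h1 h2
  simp only [pvOpsA, List.mem_flatMap, List.mem_map, List.mem_range] at hop
  obtain ⟨i', _, j', _, rfl⟩ := hop
  simp only at h1 h2
  subst h1; subst h2; rfl

theorem opsB_mem (grid : List (List Int)) (M N i j : Nat) (hi : i < M) (hj : j < N) :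
    (i, j, pvCellA grid M N i j) ∈
      (PySem.List.pyRange (-(N : Int) + 1) (M : Int) 1).flatMap (pvDiagOps grid M N) := by
  have hL : (min i j : Int) < pvL M N ((i : Int) - j) := by simp only [pvL, pvI0, pvJ0]; omega
  simp only [List.mem_flatMap, pvDiagOps, List.mem_map, List.mem_range]
  refine ⟨(i : Int) - j, ?_, min i j, by omega, ?_⟩
  · rw [PySem.List.mem_pyRange_one]
    omega
  · rw [pvCell_eq grid M N i j hi hj]
    have e1 : (pvI0 ((i : Int) - j) + ((min i j : Nat) : Int)).toNat = i := by
      simp only [pvI0]; omega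
    have e2 : (pvJ0 ((i : Int) - j) + ((min i j : Nat) : Int)).toNat = j := by
      simp only [pvI0, pvJ0]; omega
    rw [e1, e2]

theorem opsB_uniq (grid : List (List Int)) (M N i j : Nat) (hi : i < M) (hj : j < N) :
    ∀ op ∈ (PySem.List.pyRange (-(N : Int) + 1) (M : Int) 1).flatMap (pvDiagOps grid M N),
      op.1 = i → op.2.1 = j → op.2.2 = pvCellA grid M N i j := by
  intro op hop h1 h2
  simp only [List.mem_flatMap, pvDiagOps, List.mem_map, List.mem_range] at hop
  obtain ⟨d', hd', t, ht, rfl⟩ := hop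
  simp only at h1 h2
  have hiI : pvI0 d' + (t : Int) = i := by simp only [pvI0] at h1 ⊢; omega
  have hjJ : pvJ0 d' + (t : Int) = j := by simp only [pvI0, pvJ0] at h2 ⊢; omega
  have hdd : d' = (i : Int) - j := by simp only [pvI0, pvJ0] at hiI hjJ; omega
  have htt : t = min i j := by simp only [pvI0, pvJ0] at hiI hjJ; omega
  subst hdd; subst htt
  exact pvCell_eq grid M N i j hi hj

-- H. the main equality
theorem pvG2_eq_getElem (res : List (List Int)) (i j : Nat) (hi : i < res.length)
    (hj : j < res[i].length) : res[i][j] = pvG2 res i j := by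
  rw [pvG2, List.getD_eq_getElem _ [] hi, List.getD_eq_getElem _ 0 hj]

theorem pvMain (grid : List (List Int)) :
    differenceOfDistinctValues grid = differenceOfDistinctValues_alt grid := by
  rw [portA_eq, portB_eq]
  set M := grid.length with hM
  set N := (grid.headD []).length with hN
  set opsA := pvOpsA grid M N
  set opsB := (PySem.List.pyRange (-(N : Int) + 1) (M : Int) 1).flatMap (pvDiagOps grid M N)
  apply List.ext_getElem
  · rw [length_pvWrites, length_pvWrites]
  · intro i hwa hwb
    have h1 : i < M := by
      have := hwa; rw [length_pvWrites, length_pvRes0] at this; exact this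
    apply List.ext_getElem
    · have ra := rowlen_pvWrites opsA (pvRes0 M N) i
      have rb := rowlen_pvWrites opsB (pvRes0 M N) i
      rw [rowlen_pvRes0 M N i h1] at ra rb
      rw [← List.getD_eq_getElem _ [], ← List.getD_eq_getElem _ [], ra, rb]
    · intro j hja hjb
      have hjN : j < N := by
        have := hja
        rw [← List.getD_eq_getElem _ [] hwa, rowlen_pvWrites, rowlen_pvRes0 M N i h1] at this
        exact this
      have hb1 : i < (pvRes0 M N).length := by rw [length_pvRes0]; exact h1
      have hb2 : j < ((pvRes0 M N).getD i []).length := by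
        rw [rowlen_pvRes0 M N i h1]; exact hjN
      rw [pvG2_eq_getElem _ i j hwa hja, pvG2_eq_getElem _ i j hwb hjb,
        pvG2_pvWrites_mem opsA _ i j _ (opsA_mem grid M N i j h1 hjN)
          (opsA_uniq grid M N i j) hb1 hb2,
        pvG2_pvWrites_mem opsB _ i j _ (opsB_mem grid M N i j h1 hjN)
          (opsB_uniq grid M N i j h1 hjN) hb1 hb2]

-- ===== VERDICT (by name: the statement is the Claim_ definition above) =====
theorem differenceOfDistinctValues_spec : Claim_equal_differenceOfDistinctValues := by
  intro grid _ _
  unfold Spec_differenceOfDistinctValues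
  exact pvMain grid
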